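-- pv_equiv track=rewrite | github.com/Zoey7788byte/Cache_assist_meta_bo | generate_pt/Test_shared_architec.py | get_relationship
-- ===== SOURCE A (Python) =====
-- def get_relationship(model1, model2, model_families):
--     """确定两个模型的关系类型"""
--     if model1 == model2:
--         return "Same Model"
--
--     # 检查是否属于同一家族
--     for family_name, family_models in model_families.items():
--         if model1 in family_models and model2 in family_models:
--             return "Same Family"
--
--     # 检查是否有相似的主干
--     if ('resnet' in model1 and 'resnet' in model2) or \
--        ('vgg' in model1 and 'vgg' in model2) or \
--        ('mobilenet' in model1 and 'mobilenet' in model2):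
--         return "Similar Backbone"
--
--     return "Different Family"
-- ===== SOURCE B (Python) =====
-- def get_relationship(model1, model2, model_families):
--     """确定两个模型的关系类型"""
--     if model1 == model2:
--         return "Same Model"
--
--     # inverted index: model name -> set of indices of the families containing it
--     index = {}
--     for i, (family_name, family_models) in enumerate(model_families.items()):
--         for m in family_models:
--             index.setdefault(m, set()).add(i)
--
--     # same family iff the two models share a family index
--     if index.get(model1, set()) & index.get(model2, set()):
--         return "Same Family"
--
--     if any(b in model1 and b in model2 for b in ('resnet', 'vgg', 'mobilenet')):
--         return "Similar Backbone"
--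
--     return "Different Family"
-- ===== Notes on version B (the rewrite author's own statement) =====
-- stated objective: alternative
-- what changed: Replaces the per-family scan (membership test of both models in every family list) with an inverted index built once, mapping each model name to the set of family indices it occurs in, and decides 'Same Family' by set intersection of the two looked-up index sets.
import Mathlib
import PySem

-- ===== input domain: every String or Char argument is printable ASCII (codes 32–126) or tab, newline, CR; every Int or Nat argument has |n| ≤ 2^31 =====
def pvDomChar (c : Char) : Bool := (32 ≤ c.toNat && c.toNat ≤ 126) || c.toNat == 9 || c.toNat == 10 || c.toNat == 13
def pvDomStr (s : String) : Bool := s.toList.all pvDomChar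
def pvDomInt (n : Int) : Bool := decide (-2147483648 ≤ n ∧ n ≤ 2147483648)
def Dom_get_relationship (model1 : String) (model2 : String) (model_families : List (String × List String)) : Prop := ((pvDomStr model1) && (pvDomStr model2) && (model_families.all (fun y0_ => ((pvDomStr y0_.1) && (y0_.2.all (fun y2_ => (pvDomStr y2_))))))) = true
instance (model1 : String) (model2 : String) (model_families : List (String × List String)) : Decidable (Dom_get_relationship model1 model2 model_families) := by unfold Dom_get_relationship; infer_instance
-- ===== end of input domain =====

-- B replaces A's per-family scan (both-membership test inside every family list) by an inverted
-- index built once (model name → set of family indices) queried by set intersection; objective: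
-- alternative decomposition, same cost.

-- ===== PORT A =====
-- the 'for family_name, family_models in model_families.items()' loop with its early return
def grFamilyLoop (model1 : String) (model2 : String) : List (String × List String) → Option String
  | [] => none
  | fam :: rest =>
    if fam.2.contains model1 && fam.2.contains model2 then some "Same Family"
    else grFamilyLoop model1 model2 rest

def get_relationship (model1 : String) (model2 : String) (model_families : List (String × List String)) : String :=
  if model1 == model2 then "Same Model"
  else
    match grFamilyLoop model1 model2 model_families with
    | some r => r
    | none =>
      if (PySem.Str.isIn "resnet" model1 && PySem.Str.isIn "resnet" model2)
          || (PySem.Str.isIn "vgg" model1 && PySem.Str.isIn "vgg" model2)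
          || (PySem.Str.isIn "mobilenet" model1 && PySem.Str.isIn "mobilenet" model2)
      then "Similar Backbone"
      else "Different Family"

-- ===== PORT B =====
-- the index-building double loop:
--   for i, (family_name, family_models) in enumerate(...): for m in family_models: index.setdefault(m, set()).add(i)
-- (setdefault(m, set()).add(i) rebinds index[m] to its previous set — set() if absent — with i added)
def grBuildIndex (model_families : List (String × List String)) : PySem.Dict String (PySem.Set Int) :=
  (PySem.List.enumerate model_families 0).foldl
    (fun d ip => ip.2.2.foldl
      (fun d' m => d'.insert m (PySem.Set.add (d'.getD m PySem.Set.empty) ip.1)) d)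
    PySem.Dict.empty

def get_relationship_alt (model1 : String) (model2 : String) (model_families : List (String × List String)) : String :=
  if model1 == model2 then "Same Model"
  else
    let index := grBuildIndex model_families
    if PySem.Set.inter (index.getD model1 PySem.Set.empty) (index.getD model2 PySem.Set.empty) ≠ [] then
      "Same Family"
    else
      if ["resnet", "vgg", "mobilenet"].any
          (fun b => PySem.Str.isIn b model1 && PySem.Str.isIn b model2)
      then "Similar Backbone"
      else "Different Family"

-- ===== PRECONDITION & SPEC =====
def Spec_get_relationship (model1 : String) (model2 : String) (model_families : List (String × List String)) (out : String) : Prop := out = get_relationship_alt model1 model2 model_families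
instance (model1 : String) (model2 : String) (model_families : List (String × List String)) (out : String) : Decidable (Spec_get_relationship model1 model2 model_families out) := by unfold Spec_get_relationship; infer_instance

-- ===== CLAIM (what is proved, stated in full; the proofs are below) =====
def Claim_equal_get_relationship : Prop := ∀ (model1 : String) (model2 : String) (model_families : List (String × List String)), Dom_get_relationship model1 model2 model_families → Spec_get_relationship model1 model2 model_families (get_relationship model1 model2 model_families)

-- ===== LEMMAS AND PROOFS =====

-- membership in the index after the inner loop over one family's member list (family index i)
theorem mem_inner_fold (ms : List String) (d : PySem.Dict String (PySem.Set Int))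
    (i : Int) (m : String) (j : Int) :
    j ∈ (ms.foldl (fun d' x => d'.insert x (PySem.Set.add (d'.getD x PySem.Set.empty) i)) d).getD m PySem.Set.empty ↔
      j ∈ d.getD m PySem.Set.empty ∨ (m ∈ ms ∧ j = i) := by
  induction ms generalizing d with
  | nil => simp
  | cons x rest ih =>
    simp only [List.foldl_cons, ih, PySem.Dict.getD_insert]
    by_cases hx : m = x
    · subst hx; simp [PySem.Set.mem_add]; tauto
    · simp [hx]

-- membership in the index after the outer loop over the enumerated families
theorem mem_outer_fold (l : List (Int × String × List String))
    (d : PySem.Dict String (PySem.Set Int)) (m : String) (j : Int) :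
    j ∈ (l.foldl (fun d ip => ip.2.2.foldl
          (fun d' x => d'.insert x (PySem.Set.add (d'.getD x PySem.Set.empty) ip.1)) d) d).getD m PySem.Set.empty ↔
      j ∈ d.getD m PySem.Set.empty ∨ ∃ ip ∈ l, m ∈ ip.2.2 ∧ j = ip.1 := by
  induction l generalizing d with
  | nil => simp
  | cons p rest ih =>
    simp only [List.foldl_cons, ih, mem_inner_fold, List.mem_cons]
    constructor
    · rintro ((h | h) | ⟨ip, hip, hm⟩)
      · exact Or.inl h
      · exact Or.inr ⟨p, Or.inl rfl, h.1, h.2⟩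
      · exact Or.inr ⟨ip, Or.inr hip, hm⟩
    · rintro (h | ⟨ip, (rfl | hip), hm⟩)
      · exact Or.inl (Or.inl h)
      · exact Or.inl (Or.inr hm)
      · exact Or.inr ⟨ip, hip, hm⟩

-- A's family loop returns some "Same Family" exactly when some family contains both models
theorem grFamilyLoop_eq (model1 model2 : String) (fams : List (String × List String)) :
    grFamilyLoop model1 model2 fams =
      if ∃ p ∈ fams, model1 ∈ p.2 ∧ model2 ∈ p.2 then some "Same Family" else none := by
  induction fams with
  | nil => simp [grFamilyLoop]
  | cons hd tl ih =>
    simp only [grFamilyLoop, ih]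
    by_cases h : model1 ∈ hd.2 ∧ model2 ∈ hd.2
    · simp [h.1, h.2]
    · have hb : (hd.2.contains model1 && hd.2.contains model2) = false := by
        rcases not_and_or.mp h with h1 | h1 <;> simp [h1]
      simp only [hb, Bool.false_eq_true, if_false]
      by_cases h2 : ∃ p ∈ tl, model1 ∈ p.2 ∧ model2 ∈ p.2
      · obtain ⟨p, hp, hm⟩ := h2
        rw [if_pos ⟨p, hp, hm⟩, if_pos ⟨p, List.mem_cons.mpr (Or.inr hp), hm⟩]
      · rw [if_neg h2, if_neg ?_]
        rintro ⟨p, hp, hm⟩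
        rcases List.mem_cons.mp hp with rfl | hp'
        · exact h hm
        · exact h2 ⟨p, hp', hm⟩

-- j is in the index set of m exactly when m is a member of the family at index j
theorem mem_index (fams : List (String × List String)) (m : String) (j : Int) :
    j ∈ (grBuildIndex fams).getD m PySem.Set.empty ↔
      ∃ (k : Nat) (_ : k < fams.length), m ∈ fams[k].2 ∧ j = (k : Int) := by
  rw [grBuildIndex, mem_outer_fold]
  simp only [PySem.Dict.getD_empty, PySem.List.mem_enumerate_iff]
  constructor
  · rintro (h | ⟨ip, ⟨k, hk, rfl⟩, hm, rfl⟩)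
    · simp [PySem.Set.empty] at h
    · exact ⟨k, hk, hm, by simp⟩
  · rintro ⟨k, hk, hm, rfl⟩
    exact Or.inr ⟨((k : Int), fams[k]), ⟨k, hk, by simp⟩, hm, rfl⟩

-- B's intersection test is exactly A's loop condition
theorem inter_ne_iff (fams : List (String × List String)) (m1 m2 : String) :
    (PySem.Set.inter ((grBuildIndex fams).getD m1 PySem.Set.empty)
        ((grBuildIndex fams).getD m2 PySem.Set.empty) ≠ []) ↔
      ∃ p ∈ fams, m1 ∈ p.2 ∧ m2 ∈ p.2 := by
  rw [ne_eq, List.eq_nil_iff_forall_not_mem]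
  push Not
  constructor
  · rintro ⟨j, hj⟩
    rw [PySem.Set.mem_inter, mem_index, mem_index] at hj
    obtain ⟨⟨k, hk, hm1, rfl⟩, ⟨k', hk', hm2, hkk⟩⟩ := hj
    have hke : k = k' := by exact_mod_cast hkk
    subst hke
    exact ⟨fams[k], List.getElem_mem hk, hm1, hm2⟩
  · rintro ⟨p, hp, hm1, hm2⟩
    obtain ⟨k, hk, rfl⟩ := List.mem_iff_getElem.mp hp
    exact ⟨(k : Int), (PySem.Set.mem_inter _ _ _).mpr
      ⟨(mem_index fams m1 (k : Int)).mpr ⟨k, hk, hm1, rfl⟩,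
       (mem_index fams m2 (k : Int)).mpr ⟨k, hk, hm2, rfl⟩⟩⟩

-- ===== VERDICT (by name: the statement is the Claim_ definition above) =====
theorem get_relationship_spec : Claim_equal_get_relationship := by
  intro model1 model2 fams _
  unfold Spec_get_relationship get_relationship get_relationship_alt
  by_cases h0 : (model1 == model2) = true
  · simp [h0]
  · simp only [h0, Bool.false_eq_true, if_false]
    rw [grFamilyLoop_eq]
    by_cases h : ∃ p ∈ fams, model1 ∈ p.2 ∧ model2 ∈ p.2
    · rw [if_pos h, if_pos ((inter_ne_iff fams model1 model2).mpr h)]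
    · rw [if_neg h, if_neg ((inter_ne_iff fams model1 model2).not.mpr h)]
      have hcond : (["resnet", "vgg", "mobilenet"].any
            (fun b => PySem.Str.isIn b model1 && PySem.Str.isIn b model2)) =
          ((PySem.Str.isIn "resnet" model1 && PySem.Str.isIn "resnet" model2)
            || (PySem.Str.isIn "vgg" model1 && PySem.Str.isIn "vgg" model2)
            || (PySem.Str.isIn "mobilenet" model1 && PySem.Str.isIn "mobilenet" model2)) := by
        simp [List.any_cons, List.any_nil, Bool.or_assoc]
      rw [hcond]
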